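-- pv_equiv track=rewrite | github.com/gzh23/python_operator | delta.py | delta_decode
-- ===== SOURCE A (Python) =====
-- def delta_decode(sequence):
--     result = []
--     segmented_sequence = [sequence[i:i+8] for i in range(0, len(sequence), 8)]
--
--     for segment in segmented_sequence:
--         transformed_segment = [segment[0]]
--         for i in range(1, len(segment)):
--             difference = segment[i] + transformed_segment[i-1]
--             transformed_segment.append(difference)
--
--         result.extend(transformed_segment)
--
--     return result
-- ===== SOURCE B (Python) =====
-- def delta_decode(sequence):
--     result = []
--     acc = 0
--     for i, x in enumerate(sequence):
--         acc = x if i % 8 == 0 else x + acc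
--         result.append(acc)
--     return result
-- ===== Notes on version B (the rewrite author's own statement) =====
-- stated objective: simpler
-- what changed: Replaced the slice-into-8-element-segments list plus nested index loop with a single enumerate pass keeping one running accumulator that resets at every index divisible by 8.
import Mathlib
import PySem

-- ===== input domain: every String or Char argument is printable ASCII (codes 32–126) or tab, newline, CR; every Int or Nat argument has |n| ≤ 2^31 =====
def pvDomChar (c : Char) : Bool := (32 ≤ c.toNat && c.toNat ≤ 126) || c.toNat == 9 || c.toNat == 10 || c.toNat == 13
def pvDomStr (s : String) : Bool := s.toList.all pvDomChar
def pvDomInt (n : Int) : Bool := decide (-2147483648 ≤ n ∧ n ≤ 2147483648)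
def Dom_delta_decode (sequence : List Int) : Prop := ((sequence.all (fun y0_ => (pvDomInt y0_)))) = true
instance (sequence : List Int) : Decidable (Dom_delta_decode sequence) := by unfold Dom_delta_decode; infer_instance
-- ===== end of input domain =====

-- B replaces A's slice-into-8-element-segments list and nested index loop by a single
-- enumerate pass with one running accumulator that restarts at indices divisible by 8 (objective: simpler).

-- ===== PORT A =====
-- inner loop of A: transformed_segment = [segment[0]]; for i in range(1, len(segment)): append segment[i] + transformed_segment[i-1]
def deltaDecodeSegment (segment : List Int) : List Int :=
  (PySem.List.pyRange 1 (segment.length : Int) 1).foldl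
    (fun ts i => ts ++ [PySem.List.pyGetD segment i 0 + PySem.List.pyGetD ts (i - 1) 0])
    [PySem.List.pyGetD segment 0 0]

def delta_decode (sequence : List Int) : List Int :=
  let segmented := (PySem.List.pyRange 0 (sequence.length : Int) 8).map
    (fun i => PySem.List.slice sequence (some i) (some (i + 8)))
  segmented.foldl (fun result segment => result ++ deltaDecodeSegment segment) []

-- ===== PORT B =====
def delta_decode_alt (sequence : List Int) : List Int :=
  ((PySem.List.enumerate sequence 0).foldl
    (fun (st : List Int × Int) p =>
      let acc := if PySem.Int.mod p.1 8 == 0 then p.2 else p.2 + st.2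
      (st.1 ++ [acc], acc))
    ([], 0)).1

-- ===== PRECONDITION & SPEC =====
def Spec_delta_decode (sequence : List Int) (out : List Int) : Prop := out = delta_decode_alt sequence
instance (sequence : List Int) (out : List Int) : Decidable (Spec_delta_decode sequence out) := by unfold Spec_delta_decode; infer_instance

-- ===== CLAIM (what is proved, stated in full; the proofs are below) =====
def Claim_equal_delta_decode : Prop := ∀ (sequence : List Int), Dom_delta_decode sequence → Spec_delta_decode sequence (delta_decode sequence)

-- ===== LEMMAS AND PROOFS =====

-- running prefix sums: pvPsum acc [x1,…,xn] = [acc+x1, acc+x1+x2, …]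
def pvPsum (acc : Int) : List Int → List Int
  | [] => []
  | x :: xs => (acc + x) :: pvPsum (acc + x) xs

-- common reference form: decode the first 8-chunk, recurse on the rest
def pvG : List Int → List Int
  | [] => []
  | x :: xs => (x :: pvPsum x (xs.take 7)) ++ pvG (xs.drop 7)
termination_by l => l.length
decreasing_by simp

theorem pvPsum_length (acc : Int) (xs : List Int) : (pvPsum acc xs).length = xs.length := by
  induction xs generalizing acc with
  | nil => rfl
  | cons x ys ih => simp [pvPsum, ih]

theorem pvG_nil : pvG [] = [] := by rw [pvG]

theorem pvG_cons (x : Int) (xs : List Int) :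
    pvG (x :: xs) = (x :: pvPsum x (xs.take 7)) ++ pvG (xs.drop 7) := by rw [pvG]

theorem pvPsum_getD (xs : List Int) (a : Int) (k : Nat) (h : k < xs.length) :
    (a :: pvPsum a xs).getD (k + 1) 0 = (a :: pvPsum a xs).getD k 0 + xs.getD k 0 := by
  induction xs generalizing a k with
  | nil => exact absurd h (by simp)
  | cons x ys ih =>
    cases k with
    | zero => simp [pvPsum]
    | succ k =>
      have h' : k < ys.length := by simpa using h
      have := ih (a + x) k h'
      simpa [pvPsum] using this

def pvStep : List Int × Int → Int × Int → List Int × Int :=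
  fun (st : List Int × Int) p =>
    let acc := if PySem.Int.mod p.1 8 == 0 then p.2 else p.2 + st.2
    (st.1 ++ [acc], acc)

theorem pvInner (a : Int) (xs : List Int) (m : Nat) (hm : m ≤ xs.length) :
    (PySem.List.pyRange 1 (1 + (m : Int)) 1).foldl
      (fun ts i => ts ++ [PySem.List.pyGetD (a :: xs) i 0 + PySem.List.pyGetD ts (i - 1) 0])
      [a]
    = (a :: pvPsum a xs).take (m + 1) := by
  induction m with
  | zero =>
    rw [PySem.List.pyRange_one_eq_nil (by omega)]
    simp
  | succ m ih =>
    have h1 : (1 : Int) ≤ 1 + m := by omega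
    have hc : (1 + ((m + 1 : Nat) : Int)) = (1 + (m : Int)) + 1 := by push_cast; ring
    rw [hc, PySem.List.pyRange_one_succ_right h1, List.foldl_append, ih (by omega)]
    simp only [List.foldl]
    have hmx : m < xs.length := by omega
    have hF : (a :: pvPsum a xs).length = xs.length + 1 := by simp [pvPsum_length]
    have hg1 : PySem.List.pyGetD (a :: xs) (1 + (m : Int)) 0 = xs.getD m 0 := by
      rw [show (1 + (m : Int)) = ((m + 1 : Nat) : Int) by push_cast; ring,
        PySem.List.pyGetD_natCast]
      simp [List.getD]
    have hg2 : PySem.List.pyGetD ((a :: pvPsum a xs).take (m + 1)) (1 + (m : Int) - 1) 0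
        = (a :: pvPsum a xs).getD m 0 := by
      rw [show (1 + (m : Int) - 1) = ((m : Nat) : Int) from by omega,
        PySem.List.pyGetD_natCast]
      simp only [List.getD]
      rw [List.getElem?_take_of_lt (by omega : m < m + 1)]
    rw [hg1, hg2]
    have hlt : m + 1 < (a :: pvPsum a xs).length := by omega
    conv_rhs => rw [List.take_add_one]
    rw [List.getElem?_eq_getElem hlt]
    have hE : (a :: pvPsum a xs)[m + 1] = (a :: pvPsum a xs).getD (m + 1) 0 := by
      simp [List.getD, List.getElem?_eq_getElem hlt]
    simp only [Option.toList_some]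
    rw [hE, pvPsum_getD xs a m hmx]
    simp [Int.add_comm]

theorem deltaDecodeSegment_cons (a : Int) (xs : List Int) :
    deltaDecodeSegment (a :: xs) = a :: pvPsum a xs := by
  unfold deltaDecodeSegment
  rw [PySem.List.pyGetD_zero_cons]
  have hl : ((a :: xs).length : Int) = 1 + (xs.length : Int) := by simp; ring
  rw [hl, pvInner a xs xs.length le_rfl]
  apply List.take_of_length_le
  simp [pvPsum_length]

theorem pvChunks (c : Nat) : ∀ s : List Int, c = (s.length + 7) / 8 →
    (List.range c).flatMap (fun k => deltaDecodeSegment ((s.drop (8 * k)).take 8)) = pvG s := by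
  induction c with
  | zero =>
    intro s hc
    have : s.length = 0 := by omega
    rw [List.eq_nil_of_length_eq_zero this]
    simp [pvG_nil]
  | succ c ih =>
    intro s hc
    cases s with
    | nil => simp at hc
    | cons x t =>
      have hL : (x :: t).length = t.length + 1 := by simp
      rw [List.range_succ_eq_map, List.flatMap_cons, List.flatMap_map]
      have h0 : ((x :: t).drop (8 * 0)).take 8 = x :: t.take 7 := by simp
      have hrest : ∀ k : Nat,
          ((x :: t).drop (8 * Nat.succ k)).take 8 = ((t.drop 7).drop (8 * k)).take 8 := by
        intro k
        have e1 : (x :: t).drop (8 * Nat.succ k) = t.drop (8 * k + 7) := by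
          rw [show 8 * Nat.succ k = (8 * k + 7) + 1 from by omega]
          exact List.drop_succ_cons
        have e2 : (t.drop 7).drop (8 * k) = t.drop (8 * k + 7) := by
          rw [List.drop_drop, Nat.add_comm]
        rw [e1, ← e2]
      have hc' : c = ((t.drop 7).length + 7) / 8 := by
        simp only [List.length_drop]
        simp only [hL] at hc
        omega
      calc (deltaDecodeSegment (((x :: t).drop (8 * 0)).take 8)) ++
            (List.range c).flatMap (fun k => deltaDecodeSegment (((x :: t).drop (8 * Nat.succ k)).take 8))
          = (x :: pvPsum x (t.take 7)) ++
            (List.range c).flatMap (fun k => deltaDecodeSegment (((t.drop 7).drop (8 * k)).take 8)) := by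
            rw [h0, deltaDecodeSegment_cons]
            congr 1
            apply List.flatMap_congr
            intro k _
            rw [hrest k]
        _ = (x :: pvPsum x (t.take 7)) ++ pvG (t.drop 7) := by rw [ih (t.drop 7) hc']
        _ = pvG (x :: t) := by rw [pvG_cons]

theorem delta_decode_eq_pvG (s : List Int) : delta_decode s = pvG s := by
  unfold delta_decode
  rw [PySem.List.pyRange_of_pos 0 (s.length : Int) (by norm_num)]
  rw [PySem.List.foldl_append_eq_flatMap, List.flatMap_map, List.nil_append]
  have hC : (if (0 : Int) < (s.length : Int)
      then (((s.length : Int) - 0 + 8 - 1) / 8).toNat else 0) = (s.length + 7) / 8 := by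
    split
    · omega
    · omega
  rw [hC, List.flatMap_map]
  rw [← pvChunks ((s.length + 7) / 8) s rfl]
  apply List.flatMap_congr
  intro k _
  have : PySem.List.slice s (some (0 + 8 * (k : Int))) (some (0 + 8 * (k : Int) + 8))
      = (s.drop (8 * k)).take 8 := by
    have e1 : (0 + 8 * (k : Int)) = ((8 * k : Nat) : Int) := by push_cast; ring
    rw [e1, PySem.List.slice_toNat s (by positivity) (by positivity)]
    have h1 : ((((8 * k : Nat) : Int) + 8).toNat - (((8 * k : Nat) : Int)).toNat) = 8 := by omega
    have h2 : (((8 * k : Nat) : Int)).toNat = 8 * k := by omega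
    rw [h1, h2]
  rw [this]

theorem pvBplain (ys : List Int) : ∀ (i : Int) (res : List Int) (acc : Int),
    (∀ k : Nat, k < ys.length → (i + k) % 8 ≠ 0) →
    (PySem.List.enumerate ys i).foldl pvStep (res, acc) = (res ++ pvPsum acc ys, acc + ys.sum) := by
  induction ys with
  | nil => intro i res acc _; simp [pvPsum, PySem.List.enumerate]
  | cons x t ih =>
    intro i res acc h
    rw [PySem.List.enumerate_cons, List.foldl_cons]
    have h0 : i % 8 ≠ 0 := by have := h 0 (by simp); simpa using this
    have hstep : pvStep (res, acc) (i, x) = (res ++ [acc + x], acc + x) := by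
      simp only [pvStep]
      rw [PySem.Int.mod_eq_emod_of_pos (by norm_num)]
      simp [h0, Int.add_comm]
    rw [hstep, ih (i + 1) (res ++ [acc + x]) (acc + x)
        (by intro k hk; have := h (k + 1) (by simpa using Nat.succ_lt_succ hk)
            push_cast at this ⊢; omega)]
    simp [pvPsum]
    ring

theorem pvBmain (n : Nat) : ∀ xs : List Int, xs.length ≤ n → ∀ (res : List Int) (acc i : Int),
    i % 8 = 0 → ((PySem.List.enumerate xs i).foldl pvStep (res, acc)).1 = res ++ pvG xs := by
  induction n with
  | zero =>
    intro xs hx res acc i _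
    have : xs = [] := by
      cases xs with
      | nil => rfl
      | cons a t => simp at hx
    subst this
    simp [pvG_nil, PySem.List.enumerate]
  | succ n ih =>
    intro xs hx res acc i hi
    cases xs with
    | nil => simp [pvG_nil, PySem.List.enumerate]
    | cons x t =>
      rw [PySem.List.enumerate_cons, List.foldl_cons]
      have hstep : pvStep (res, acc) (i, x) = (res ++ [x], x) := by
        simp only [pvStep]
        rw [PySem.Int.mod_eq_emod_of_pos (by norm_num)]
        simp [hi]
      rw [hstep]
      have he : PySem.List.enumerate t (i + 1)
          = PySem.List.enumerate (t.take 7) (i + 1)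
            ++ PySem.List.enumerate (t.drop 7) (i + 1 + ((t.take 7).length : Int)) := by
        conv_lhs => rw [← List.take_append_drop 7 t]
        rw [PySem.List.enumerate_append]
      rw [he, List.foldl_append]
      rw [pvBplain (t.take 7) (i + 1) (res ++ [x]) x
          (by intro k hk
              have hk7 : k < 7 := lt_of_lt_of_le hk (by simp [List.length_take])
              omega)]
      by_cases hd : t.drop 7 = []
      · rw [hd]
        simp [pvG_cons, hd, pvG_nil, PySem.List.enumerate]
      · have h7 : 7 < t.length := by
          by_contra hle
          exact hd (List.drop_eq_nil_of_le (by omega))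
        have ht7 : (t.take 7).length = 7 := by simp [List.length_take]; omega
        rw [ht7]
        simp only [Nat.cast_ofNat]
        rw [ih (t.drop 7) (by simp at hx ⊢; omega) (res ++ [x] ++ pvPsum x (t.take 7))
            (x + (t.take 7).sum) (i + 1 + 7) (by omega)]
        simp [pvG_cons]

theorem delta_decode_alt_eq_pvG (s : List Int) : delta_decode_alt s = pvG s := by
  have : delta_decode_alt s = ((PySem.List.enumerate s 0).foldl pvStep ([], 0)).1 := rfl
  rw [this, pvBmain s.length s le_rfl [] 0 0 (by norm_num)]
  simp

-- ===== VERDICT (by name: the statement is the Claim_ definition above) =====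
theorem delta_decode_spec : Claim_equal_delta_decode := by
  intro sequence _
  unfold Spec_delta_decode
  rw [delta_decode_eq_pvG, delta_decode_alt_eq_pvG]
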